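-- pv_equiv track=rewrite | github.com/luzhipeng728/jianli | backend/app/agents/unified_interviewer_agent.py | check_advance_signal
-- ===== SOURCE A (Python) =====
-- def check_advance_signal(response: str) -> tuple[str, bool]:
--     """Check if response contains advance phase signal"""
--     should_advance = False
--     cleaned = response
--
--     # 支持多种标记格式
--     advance_markers = ["[ADVANCE_PHASE]", "[ADVANCE]", "【ADVANCE】", "[advance]"]
--     for marker in advance_markers:
--         if marker in cleaned:
--             cleaned = cleaned.replace(marker, "")
--             should_advance = True
--
--     return cleaned.strip(), should_advance
-- ===== SOURCE B (Python) =====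
-- def check_advance_signal(response: str) -> tuple[str, bool]:
--     """Single left-to-right scan: at each position try the markers in order;
--     on a match skip it and set the flag, otherwise copy the character."""
--     markers = ["[ADVANCE_PHASE]", "[ADVANCE]", "【ADVANCE】", "[advance]"]
--     out = []
--     i = 0
--     found = False
--     while i < len(response):
--         for m in markers:
--             if response.startswith(m, i):
--                 i += len(m)
--                 found = True
--                 break
--         else:
--             out.append(response[i])
--             i += 1
--     return "".join(out).strip(), found
-- ===== Notes on version B (the rewrite author's own statement) =====
-- stated objective: alternative
-- what changed: A makes four sequential full replace passes (one per marker, each rebuilding the string); B removes all markers in one single left-to-right scan that tries the markers at each position.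
-- outside the precondition, e.g. on check_advance_signal('[ADVANCE[ADVANCE_PHASE]]'): A returns ('', True), B returns ('[ADVANCE]', True)
import Mathlib
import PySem

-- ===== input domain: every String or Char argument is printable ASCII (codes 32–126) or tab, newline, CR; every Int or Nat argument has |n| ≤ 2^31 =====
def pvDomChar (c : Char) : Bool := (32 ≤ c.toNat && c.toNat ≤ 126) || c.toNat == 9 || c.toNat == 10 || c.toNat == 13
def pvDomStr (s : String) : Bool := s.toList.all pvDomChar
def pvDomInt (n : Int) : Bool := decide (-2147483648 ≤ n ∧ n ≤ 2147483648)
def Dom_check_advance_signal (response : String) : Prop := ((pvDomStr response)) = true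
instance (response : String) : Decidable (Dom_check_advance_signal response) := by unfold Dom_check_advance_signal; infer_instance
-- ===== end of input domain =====

-- B replaces A's four sequential replace passes by one single left-to-right scan (alternative decomposition, same cost class).

-- ===== PORT A =====
-- A: for each marker in order, if it occurs, replace it everywhere and set the flag; finally strip.
def check_advance_signal (response : String) : String × Bool :=
  let advance_markers : List (List Char) :=
    ["[ADVANCE_PHASE]".toList, "[ADVANCE]".toList, "【ADVANCE】".toList, "[advance]".toList]
  let st := advance_markers.foldl
    (fun (st : List Char × Bool) marker =>
      if PySem.Chars.isIn marker st.1 then (PySem.Chars.replace st.1 marker [], true) else st)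
    (response.toList, false)
  (String.ofList (PySem.Chars.strip st.1), st.2)

-- ===== PORT B =====
-- B: one pass over the characters; at each position try the markers in order (the for/break loop of Source B);
-- on a match skip the marker and set the flag, else copy the character.
def scanGo (markers : List (List Char)) : List Char → List Char × Bool
  | [] => ([], false)
  | c :: t =>
    match List.find? (fun m => m.isPrefixOf (c :: t)) markers with
    | some m =>
      let r := scanGo markers (t.drop (m.length - 1))
      (r.1, true)
    | none =>
      let r := scanGo markers t
      (c :: r.1, r.2)
termination_by l => l.length
decreasing_by
  all_goals simp [List.length_drop]

def check_advance_signal_alt (response : String) : String × Bool :=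
  let markers : List (List Char) :=
    ["[ADVANCE_PHASE]".toList, "[ADVANCE]".toList, "【ADVANCE】".toList, "[advance]".toList]
  let r := scanGo markers response.toList
  (String.ofList (PySem.Chars.strip r.1), r.2)

-- ===== PRECONDITION & SPEC =====
def pvMarkerList : List (List Char) :=
  ["[ADVANCE_PHASE]".toList, "[ADVANCE]".toList, "【ADVANCE】".toList, "[advance]".toList]

-- every string "nonempty proper prefix of a marker ++ marker"
def pvBadPatterns : List (List Char) :=
  (pvMarkerList.flatMap (fun m => (List.range' 1 (m.length - 1)).map (fun i => m.take i))).flatMap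
    (fun q => pvMarkerList.map (fun m => q ++ m))

-- Pre_ excludes strings in which a marker occurrence is immediately preceded by a nonempty proper
-- prefix of a marker: only there can A's sequential replace passes splice together a new marker
-- occurrence that a pass then removes (or leaves, depending on pass order) — an accidental corner of
-- A's pass order that no caller specifies; the guard is syntactic and also excludes some such strings
-- on which the two agree.
def Pre_check_advance_signal (response : String) : Prop :=
  (pvBadPatterns.all (fun b => !(PySem.Chars.isIn b response.toList))) = true
instance (response : String) : Decidable (Pre_check_advance_signal response) := by
  unfold Pre_check_advance_signal; infer_instance

def pvWitness_check_advance_signal : String := "ok"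

def Spec_check_advance_signal (response : String) (out : String × Bool) : Prop :=
  out = check_advance_signal_alt response
instance (response : String) (out : String × Bool) : Decidable (Spec_check_advance_signal response out) := by
  unfold Spec_check_advance_signal; infer_instance

-- ===== CLAIM (what is proved, stated in full; the proofs are below) =====
def Claim_equal_check_advance_signal : Prop :=
  ∀ (response : String), Dom_check_advance_signal response →
    Pre_check_advance_signal response →
      Spec_check_advance_signal response (check_advance_signal response)

-- ===== LEMMAS AND PROOFS =====

-- simple one-pass deletion of all occurrences of m (the semantics of Python's s.replace(m, ""))
def removeAll (m : List Char) : List Char → List Char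
  | [] => []
  | c :: t => if m.isPrefixOf (c :: t) then removeAll m (t.drop (m.length - 1)) else c :: removeAll m t
termination_by l => l.length
decreasing_by
  all_goals simp [List.length_drop]

-- abbreviation used by the proofs
def BadFree (s : List Char) : Prop := ∀ b ∈ pvBadPatterns, ¬ b <:+: s

theorem badFree_of_infix {s u : List Char} (h : u <:+: s) (hs : BadFree s) : BadFree u := by
  intro b hb hbu
  exact hs b hb (hbu.trans h)

-- concrete facts about the four markers, by decide
theorem markers_ne_nil : ∀ m ∈ pvMarkerList, m ≠ [] := by decide

theorem markers_no_prefix : ∀ m ∈ pvMarkerList, ∀ m' ∈ pvMarkerList, m ≠ m' → ¬ m <+: m' := by decide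

theorem markers_drop_no_prefix :
    ∀ m ∈ pvMarkerList, ∀ m' ∈ pvMarkerList, ∀ i, 1 ≤ i → i < m'.length →
      ¬ (m'.drop i <+: m) ∧ ¬ (m <+: m'.drop i) := by decide

theorem bad_mem {m mk : List Char} (hm : m ∈ pvMarkerList) (hmk : mk ∈ pvMarkerList)
    {i : ℕ} (h1 : 1 ≤ i) (h2 : i < mk.length) : (mk.take i ++ m) ∈ pvBadPatterns := by
  unfold pvBadPatterns
  rw [List.mem_flatMap]
  refine ⟨mk.take i, ?_, ?_⟩
  · rw [List.mem_flatMap]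
    exact ⟨mk, hmk, List.mem_map.2 ⟨i, List.mem_range'_1.2 ⟨h1, by omega⟩, rfl⟩⟩
  · exact List.mem_map.2 ⟨m, hm, rfl⟩

theorem bad_elim {b : List Char} (hb : b ∈ pvBadPatterns) :
    ∃ mk ∈ pvMarkerList, ∃ mj ∈ pvMarkerList, ∃ i, 1 ≤ i ∧ i < mk.length ∧ b = mk.take i ++ mj := by
  unfold pvBadPatterns at hb
  rw [List.mem_flatMap] at hb
  obtain ⟨q, hq, hb⟩ := hb
  rw [List.mem_flatMap] at hq
  obtain ⟨mk, hmk, hq⟩ := hq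
  rw [List.mem_map] at hq
  obtain ⟨i, hi, rfl⟩ := hq
  rw [List.mem_range'_1] at hi
  rw [List.mem_map] at hb
  obtain ⟨mj, hmj, rfl⟩ := hb
  exact ⟨mk, hmk, mj, hmj, i, hi.1, by omega, rfl⟩

theorem removeAll_nil (m : List Char) : removeAll m [] = [] := by simp [removeAll]

theorem removeAll_cons_pos {m : List Char} {c : Char} {t : List Char}
    (h : m.isPrefixOf (c :: t) = true) :
    removeAll m (c :: t) = removeAll m (t.drop (m.length - 1)) := by
  rw [removeAll]; simp [h]

theorem removeAll_cons_neg {m : List Char} {c : Char} {t : List Char}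
    (h : ¬ m.isPrefixOf (c :: t) = true) :
    removeAll m (c :: t) = c :: removeAll m t := by
  rw [removeAll]; simp [h]

theorem scanGo_nil (markers : List (List Char)) : scanGo markers [] = ([], false) := by
  simp [scanGo]

theorem scanGo_cons_pos {markers : List (List Char)} {c : Char} {t : List Char} {m : List Char}
    (h : List.find? (fun m => m.isPrefixOf (c :: t)) markers = some m) :
    scanGo markers (c :: t) = ((scanGo markers (t.drop (m.length - 1))).1, true) := by
  rw [scanGo]; simp [h]

theorem scanGo_cons_neg {markers : List (List Char)} {c : Char} {t : List Char}
    (h : List.find? (fun m => m.isPrefixOf (c :: t)) markers = none) :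
    scanGo markers (c :: t) =
      ((c :: (scanGo markers t).1), (scanGo markers t).2) := by
  rw [scanGo]; simp [h]

-- replace with empty replacement = removeAll
theorem replace_go_eq (m : List Char) (hm : m ≠ []) :
    ∀ fuel l acc, l.length ≤ fuel →
      PySem.Chars.replace.go m [] fuel l acc = acc.reverse ++ removeAll m l := by
  intro fuel
  induction fuel with
  | zero =>
    intro l acc hl
    have hl0 : l = [] := List.length_eq_zero_iff.1 (Nat.le_zero.1 hl)
    subst hl0
    simp [PySem.Chars.replace.go, removeAll_nil]
  | succ n ih =>
    intro l acc hl
    cases l with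
    | nil => simp [PySem.Chars.replace.go, removeAll_nil]
    | cons c t =>
      obtain ⟨a, m', rfl⟩ : ∃ a m', m = a :: m' := by
        cases m with
        | nil => exact absurd rfl hm
        | cons a m' => exact ⟨a, m', rfl⟩
      by_cases h : (a :: m').isPrefixOf (c :: t) = true
      · rw [show PySem.Chars.replace.go (a :: m') [] (n+1) (c :: t) acc
            = PySem.Chars.replace.go (a :: m') [] n (List.drop (a :: m').length (c :: t)) acc from by
          rw [PySem.Chars.replace.go]; simp [h]]
        rw [removeAll_cons_pos h]
        have hdrop : List.drop (a :: m').length (c :: t) = t.drop ((a :: m').length - 1) := by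
          simp [List.drop_succ_cons]
        rw [hdrop]
        exact ih _ acc (by simp at hl ⊢; omega)
      · rw [show PySem.Chars.replace.go (a :: m') [] (n+1) (c :: t) acc
            = PySem.Chars.replace.go (a :: m') [] n t (c :: acc) from by
          rw [PySem.Chars.replace.go]; simp [h]]
        rw [removeAll_cons_neg h, ih t (c :: acc) (by simp at hl ⊢; omega)]
        simp

theorem replace_eq_removeAll (m : List Char) (hm : m ≠ []) (s : List Char) :
    PySem.Chars.replace s m [] = removeAll m s := by
  rw [PySem.Chars.replace]
  rw [if_neg (by simp [List.isEmpty_iff, hm])]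
  simpa using replace_go_eq m hm s.length s [] le_rfl

theorem removeAll_of_not_infix {m : List Char} :
    ∀ s : List Char, ¬ m <:+: s → removeAll m s = s := by
  intro s
  induction s using removeAll.induct (m := m) with
  | case1 => intro _; exact removeAll_nil m
  | case2 c t h ih =>
    intro hni
    exact absurd (List.IsPrefix.isInfix (List.isPrefixOf_iff_prefix.1 h)) hni
  | case3 c t h ih =>
    intro hni
    rw [removeAll_cons_neg h, ih (fun hc => hni (List.infix_cons_iff.2 (Or.inr hc)))]

-- deleting all m's cannot manufacture a prefix out of nothing: a new prefix pins an m inside it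
theorem prefix_removeAll {m : List Char} :
    ∀ (s p : List Char), p ≠ [] → p <+: removeAll m s → ¬ p <+: s →
      ∃ p1 p2, p = p1 ++ p2 ∧ p2 ≠ [] ∧ (p1 ++ m) <+: s := by
  intro s
  induction s using removeAll.induct (m := m) with
  | case1 =>
    intro p hp hpre _
    rw [removeAll_nil] at hpre
    exact absurd (List.prefix_nil.1 hpre) hp
  | case2 c t h ih =>
    intro p hp hpre hnp
    exact ⟨[], p, rfl, hp, by simpa using List.isPrefixOf_iff_prefix.1 h⟩
  | case3 c t h ih =>
    intro p hp hpre hnp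
    rw [removeAll_cons_neg h] at hpre
    cases p with
    | nil => exact absurd rfl hp
    | cons d p' =>
      obtain ⟨rfl, hp'⟩ := List.cons_prefix_cons.1 hpre
      have hnp' : ¬ p' <+: t := fun hc => hnp (List.cons_prefix_cons.2 ⟨rfl, hc⟩)
      have hp'ne : p' ≠ [] := by
        rintro rfl; exact hnp' (List.nil_prefix)
      obtain ⟨p1, p2, heq, hp2, hpm⟩ := ih p' hp'ne hp' hnp'
      exact ⟨d :: p1, p2, by simp [heq], hp2, List.cons_prefix_cons.2 ⟨rfl, hpm⟩⟩

theorem bad_ne_nil {b : List Char} (hb : b ∈ pvBadPatterns) : b ≠ [] := by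
  obtain ⟨mk, hmk, mj, hmj, i, h1, h2, rfl⟩ := bad_elim hb
  have := markers_ne_nil mj hmj
  simp [this]

-- a proper nonempty prefix of a bad pattern, followed by m, is (or contains) a bad pattern
theorem bad_pattern_prefix {m b p1 : List Char} (hm : m ∈ pvMarkerList)
    (hb : b ∈ pvBadPatterns) (hp1 : p1 ≠ []) (hlt : p1.length < b.length) (hpre : p1 <+: b)
    {s : List Char} (hps : (p1 ++ m) <+: s) : ¬ BadFree s := by
  intro hbf
  obtain ⟨mk, hmk, mj, hmj, i, hi1, hi2, rfl⟩ := bad_elim hb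
  have htake : p1 = (mk.take i ++ mj).take p1.length := List.prefix_iff_eq_take.1 hpre
  have hlen_take : (mk.take i).length = i := by
    rw [List.length_take]; omega
  by_cases hle : p1.length ≤ i
  · -- p1 is a nonempty prefix of mk
    have hp1' : p1 = mk.take p1.length := by
      conv_lhs => rw [htake]
      rw [List.take_append, hlen_take, Nat.sub_eq_zero_of_le hle, List.take_zero,
        List.append_nil, List.take_take, Nat.min_eq_left hle]
    have hmem : (mk.take p1.length ++ m) ∈ pvBadPatterns := by
      refine bad_mem hm hmk ?_ ?_
      · have : p1.length ≠ 0 := fun hc => hp1 (List.length_eq_zero_iff.1 hc)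
        omega
      · omega
    exact hbf _ hmem ((hp1' ▸ hps).isInfix)
  · -- p1 = mk.take i ++ mj.take j with 1 ≤ j < mj.length
    have hj1 : 1 ≤ p1.length - i := by omega
    have hj2 : p1.length - i < mj.length := by
      have hl2 : (List.take i mk ++ mj).length = i + mj.length := by
        rw [List.length_append, hlen_take]
      rw [hl2] at hlt
      omega
    have hp1' : p1 = mk.take i ++ mj.take (p1.length - i) := by
      conv_lhs => rw [htake]
      rw [List.take_append, hlen_take, List.take_take,
        Nat.min_eq_right (by omega : i ≤ p1.length)]
    have hmem : (mj.take (p1.length - i) ++ m) ∈ pvBadPatterns := bad_mem hm hmj hj1 hj2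
    have hsuf : (mj.take (p1.length - i) ++ m) <:+: s := by
      have h1 : (mj.take (p1.length - i) ++ m) <:+ (p1 ++ m) := by
        conv_rhs => rw [hp1', List.append_assoc]
        exact (List.suffix_append _ _)
      exact h1.isInfix.trans hps.isInfix
    exact hbf _ hmem hsuf

theorem badFree_removeAll {m : List Char} (hm : m ∈ pvMarkerList) :
    ∀ s, BadFree s → BadFree (removeAll m s) := by
  intro s
  induction s using removeAll.induct (m := m) with
  | case1 => intro h; rwa [removeAll_nil]
  | case2 c t h ih =>
    intro hbf
    rw [removeAll_cons_pos h]
    exact ih (badFree_of_infix (((List.drop_suffix _ _).trans (List.suffix_cons c t)).isInfix) hbf)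
  | case3 c t h ih =>
    intro hbf
    rw [removeAll_cons_neg h]
    have hbt : BadFree (removeAll m t) :=
      ih (badFree_of_infix ((List.suffix_cons c t).isInfix) hbf)
    intro b hb hinf
    rcases List.infix_cons_iff.1 hinf with hpre | hinf2
    · -- b is a prefix of removeAll m (c :: t)
      rw [← removeAll_cons_neg h] at hpre
      by_cases hbs : b <+: c :: t
      · exact hbf b hb hbs.isInfix
      · obtain ⟨p1, p2, heq, hp2, hpm⟩ := prefix_removeAll _ b (bad_ne_nil hb) hpre hbs
        cases p1 with
        | nil =>
          simp at hpm
          exact h (List.isPrefixOf_iff_prefix.2 hpm)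
        | cons e p1' =>
          refine bad_pattern_prefix hm hb (by simp) ?_ ?_ hpm hbf
          · rw [heq, List.length_append]
            have : p2.length ≠ 0 := fun hc => hp2 (List.length_eq_zero_iff.1 hc)
            omega
          · exact heq ▸ List.prefix_append _ _
    · exact hbt b hb hinf2

-- shifting the scanned string to start at the found marker keeps the find? result
theorem find?_shift {ms : List (List Char)} (hms : ∀ x ∈ ms, x ∈ pvMarkerList)
    {s mj : List Char} (hf : List.find? (fun m => m.isPrefixOf s) ms = some mj)
    (hpre : mj <+: s) :
    ∀ Y, List.find? (fun m => m.isPrefixOf (mj ++ Y)) ms = some mj := by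
  induction ms with
  | nil => simp at hf
  | cons a ms' ih =>
    intro Y
    by_cases ha : a.isPrefixOf s = true
    · rw [List.find?_cons_of_pos (p := fun m : List Char => m.isPrefixOf s) ha] at hf
      obtain rfl : a = mj := by injection hf
      exact List.find?_cons_of_pos (p := fun m : List Char => m.isPrefixOf (a ++ Y))
        (List.isPrefixOf_iff_prefix.2 (List.prefix_append _ _))
    · rw [List.find?_cons_of_neg (p := fun m : List Char => m.isPrefixOf s) ha] at hf
      have hane : ¬ a.isPrefixOf (mj ++ Y) = true := by
        intro hc
        have hamem : a ∈ pvMarkerList := hms a (by simp)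
        have hmjmem : mj ∈ pvMarkerList :=
          hms mj (List.mem_cons_of_mem a (List.mem_of_find?_eq_some hf))
        have hanemj : a ≠ mj := by
          rintro rfl
          exact ha (List.isPrefixOf_iff_prefix.2 hpre)
        rcases List.prefix_or_prefix_of_prefix (List.isPrefixOf_iff_prefix.1 hc)
            (List.prefix_append mj Y) with h1 | h1
        · exact markers_no_prefix a hamem mj hmjmem hanemj h1
        · exact markers_no_prefix mj hmjmem a hamem (Ne.symm hanemj) h1
      rw [List.find?_cons_of_neg (p := fun m : List Char => m.isPrefixOf (mj ++ Y)) hane]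
      exact ih (fun x hx => hms x (List.mem_cons_of_mem a hx)) hf Y

-- removing m from u ++ v when no m-occurrence starts inside u
theorem removeAll_append (m : List Char) :
    ∀ (u v : List Char), (∀ i, i < u.length → ¬ m <+: (u.drop i ++ v)) →
      removeAll m (u ++ v) = u ++ removeAll m v := by
  intro u
  induction u with
  | nil => intro v _; rfl
  | cons c u' ih =>
    intro v hno
    have h0 : ¬ m.isPrefixOf (c :: (u' ++ v)) = true := by
      intro hc
      exact hno 0 (by simp) (by simpa using List.isPrefixOf_iff_prefix.1 hc)
    rw [List.cons_append, removeAll_cons_neg h0, ih v (fun i hi => hno (i+1) (by simp; omega))]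
    rfl

theorem scanGo_no_markers : ∀ l, scanGo [] l = (l, false) := by
  intro l
  induction l with
  | nil => exact scanGo_nil []
  | cons c t ih => rw [scanGo_cons_neg (by simp), ih]

-- the peeling lemma: one scan with (m :: ms) = replace-all-m, then scan with ms
theorem scan_peel {m : List Char} (hm : m ∈ pvMarkerList) {ms : List (List Char)}
    (hms : ∀ x ∈ ms, x ∈ pvMarkerList) :
    ∀ n (s : List Char), s.length ≤ n → BadFree s →
      scanGo (m :: ms) s =
        ((scanGo ms (removeAll m s)).1,
          (decide (m <:+: s) || (scanGo ms (removeAll m s)).2)) := by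
  have hmne : m ≠ [] := markers_ne_nil m hm
  intro n
  induction n with
  | zero =>
    intro s hl _
    have hs0 : s = [] := List.length_eq_zero_iff.1 (Nat.le_zero.1 hl)
    subst hs0
    rw [removeAll_nil, scanGo_nil, scanGo_nil]
    simp [List.infix_nil, hmne]
  | succ n ih =>
    intro s hl hbf
    cases s with
    | nil =>
      rw [removeAll_nil, scanGo_nil, scanGo_nil]
      simp [List.infix_nil, hmne]
    | cons c t =>
      by_cases h1 : m.isPrefixOf (c :: t) = true
      · -- m matches at the head
        have hf : List.find? (fun m' => m'.isPrefixOf (c :: t)) (m :: ms) = some m :=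
          List.find?_cons_of_pos (p := fun m' : List Char => m'.isPrefixOf (c :: t)) h1
        rw [scanGo_cons_pos hf, removeAll_cons_pos h1]
        have hrest_len : (t.drop (m.length - 1)).length ≤ n := by
          simp at hl ⊢; omega
        have hrest_bf : BadFree (t.drop (m.length - 1)) :=
          badFree_of_infix (((List.drop_suffix _ _).trans (List.suffix_cons c t)).isInfix) hbf
        have IH := ih _ hrest_len hrest_bf
        rw [congrArg Prod.fst IH]
        have hminf : (decide (m <:+: c :: t)) = true := by
          simp [List.IsPrefix.isInfix (List.isPrefixOf_iff_prefix.1 h1)]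
        rw [hminf, Bool.true_or]
      · cases hf : List.find? (fun m' => m'.isPrefixOf (c :: t)) ms with
        | some mj =>
          -- a later marker matches at the head
          have hfind : List.find? (fun m' => m'.isPrefixOf (c :: t)) (m :: ms) = some mj := by
            rw [List.find?_cons_of_neg (p := fun m' : List Char => m'.isPrefixOf (c :: t)) h1]; exact hf
          have hmj_mem : mj ∈ pvMarkerList := hms mj
            (List.mem_of_find?_eq_some (p := fun m' : List Char => m'.isPrefixOf (c :: t)) hf)
          have hmj_ne : mj ≠ [] := markers_ne_nil mj hmj_mem
          have hmj_pre : mj <+: c :: t := List.isPrefixOf_iff_prefix.1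
            (List.find?_some (p := fun m' : List Char => m'.isPrefixOf (c :: t)) hf)
          obtain ⟨b, mj', rfl⟩ : ∃ b mj', mj = b :: mj' := by
            cases mj with
            | nil => exact absurd rfl hmj_ne
            | cons b mj' => exact ⟨b, mj', rfl⟩
          obtain ⟨hbc, hpre'⟩ := List.cons_prefix_cons.1 hmj_pre
          obtain ⟨rest, hrest⟩ := hpre'
          have hmnp : ¬ m <+: c :: t := fun hc => h1 (List.isPrefixOf_iff_prefix.2 hc)
          have hdrop : t.drop ((b :: mj').length - 1) = rest := by
            rw [← hrest]
            simp
          have hsplit : c :: t = (b :: mj') ++ rest := by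
            rw [List.cons_append, hrest, hbc]
          have hnostart : ∀ i, i < (b :: mj').length → ¬ m <+: ((b :: mj').drop i ++ rest) := by
            intro i hi hc
            cases i with
            | zero =>
              rw [List.drop_zero, ← hsplit] at hc
              exact hmnp hc
            | succ i' =>
              rcases List.prefix_or_prefix_of_prefix hc
                  (List.prefix_append ((b :: mj').drop (i' + 1)) rest) with hx | hx
              · exact (markers_drop_no_prefix m hm (b :: mj') hmj_mem (i' + 1)
                  (by omega) hi).2 hx
              · exact (markers_drop_no_prefix m hm (b :: mj') hmj_mem (i' + 1)
                  (by omega) hi).1 hx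
          have hRA : removeAll m (c :: t) = (b :: mj') ++ removeAll m rest := by
            rw [hsplit]
            exact removeAll_append m _ rest hnostart
          have hshift := find?_shift hms hf hmj_pre (removeAll m rest)
          have hscan : scanGo ms ((b :: mj') ++ removeAll m rest)
              = ((scanGo ms ((mj' ++ removeAll m rest).drop ((b :: mj').length - 1))).1, true) :=
            scanGo_cons_pos hshift
          have hdrop2 : (mj' ++ removeAll m rest).drop ((b :: mj').length - 1)
              = removeAll m rest := by
            simp only [List.length_cons, Nat.add_sub_cancel, List.drop_left]
          have hrest_len : rest.length ≤ n := by
            have h1l : (c :: t).length ≤ n + 1 := hl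
            have h2l : mj'.length + rest.length = t.length := by
              rw [← hrest, List.length_append]
            simp at h1l
            omega
          have hrest_bf : BadFree rest :=
            badFree_of_infix (List.IsSuffix.isInfix
              (List.IsSuffix.trans ⟨mj', hrest⟩ (List.suffix_cons c t))) hbf
          have IH := ih rest hrest_len hrest_bf
          rw [scanGo_cons_pos hfind, hdrop, congrArg Prod.fst IH, hRA, hscan, hdrop2]
          simp
        | none =>
          -- no marker matches at the head
          have hfind : List.find? (fun m' => m'.isPrefixOf (c :: t)) (m :: ms) = none := by
            rw [List.find?_cons_of_neg (p := fun m' : List Char => m'.isPrefixOf (c :: t)) h1]; exact hf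
          have hmnp : ¬ m <+: c :: t := fun hc => h1 (List.isPrefixOf_iff_prefix.2 hc)
          rw [scanGo_cons_neg hfind, removeAll_cons_neg h1]
          have hbt : BadFree t := badFree_of_infix ((List.suffix_cons c t).isInfix) hbf
          have hf2 : List.find? (fun m' => m'.isPrefixOf (c :: removeAll m t)) ms = none := by
            rw [List.find?_eq_none]
            intro mk hmk hc
            have hmk_mem : mk ∈ pvMarkerList := hms mk hmk
            have hmk_pre : mk <+: removeAll m (c :: t) := by
              rw [removeAll_cons_neg h1]
              exact List.isPrefixOf_iff_prefix.1 hc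
            have hmk_np : ¬ mk <+: c :: t := by
              intro hcc
              have := List.find?_eq_none.1 hf mk hmk
              exact this (List.isPrefixOf_iff_prefix.2 hcc)
            obtain ⟨p1, p2, heq, hp2, hpm⟩ :=
              prefix_removeAll _ mk (markers_ne_nil mk hmk_mem) hmk_pre hmk_np
            cases hp1 : p1 with
            | nil =>
              subst hp1; simp at hpm
              exact hmnp hpm
            | cons e p1' =>
              subst hp1
              have hlt : (e :: p1').length < mk.length := by
                rw [heq, List.length_append]
                have : p2.length ≠ 0 := fun hcc => hp2 (List.length_eq_zero_iff.1 hcc)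
                omega
              have hmem : (mk.take (e :: p1').length ++ m) ∈ pvBadPatterns :=
                bad_mem hm hmk_mem (by simp) hlt
              have hptake : (e :: p1') = mk.take (e :: p1').length :=
                List.prefix_iff_eq_take.1 (heq ▸ List.prefix_append _ _)
              exact hbf _ hmem ((hptake ▸ hpm).isInfix)
          rw [scanGo_cons_neg hf2]
          have IH := ih t (by simp at hl ⊢; omega) hbt
          rw [IH]
          have hinfc : (m <:+: c :: t) ↔ (m <:+: t) := by
            rw [List.infix_cons_iff]
            exact ⟨fun h => h.resolve_left hmnp, Or.inr⟩
          simp [hinfc]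
-- A's loop body, rewritten uniformly: replace-if-present = removeAll, flag-or
theorem stepA_eq : ∀ mk ∈ pvMarkerList, ∀ (l : List Char) (b : Bool),
    (if PySem.Chars.isIn mk l then (PySem.Chars.replace l mk [], true) else (l, b))
      = (removeAll mk l, b || decide (mk <:+: l)) := by
  intro mk hmk l b
  by_cases hin : mk <:+: l
  · rw [if_pos ((PySem.Chars.isIn_iff_infix mk l).2 hin)]
    rw [replace_eq_removeAll mk (markers_ne_nil mk hmk) l]
    simp [hin]
  · rw [if_neg (fun hc => hin ((PySem.Chars.isIn_iff_infix mk l).1 hc))]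
    rw [removeAll_of_not_infix l hin]
    simp [hin]

-- ===== VERDICT (by name: the statement is the Claim_ definition above) =====
theorem check_advance_signal_spec : Claim_equal_check_advance_signal := by
  unfold Claim_equal_check_advance_signal
  intro response _ hpre
  unfold Spec_check_advance_signal check_advance_signal check_advance_signal_alt
  simp only []
  have hbf0 : BadFree response.toList := by
    intro b hb
    have h := List.all_eq_true.1 hpre b hb
    rw [Bool.not_eq_eq_eq_not, Bool.not_true] at h
    exact (PySem.Chars.isIn_eq_false_iff b response.toList).1 h
  have hm1 : "[ADVANCE_PHASE]".toList ∈ pvMarkerList := List.Mem.head _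
  have hm2 : "[ADVANCE]".toList ∈ pvMarkerList := List.Mem.tail _ (List.Mem.head _)
  have hm3 : "【ADVANCE】".toList ∈ pvMarkerList :=
    List.Mem.tail _ (List.Mem.tail _ (List.Mem.head _))
  have hm4 : "[advance]".toList ∈ pvMarkerList :=
    List.Mem.tail _ (List.Mem.tail _ (List.Mem.tail _ (List.Mem.head _)))
  have hsub3 : ∀ x ∈ ["[ADVANCE]".toList, "【ADVANCE】".toList, "[advance]".toList],
      x ∈ pvMarkerList := fun x hx => List.Mem.tail _ hx
  have hsub2 : ∀ x ∈ ["【ADVANCE】".toList, "[advance]".toList], x ∈ pvMarkerList :=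
    fun x hx => List.Mem.tail _ (List.Mem.tail _ hx)
  have hsub1 : ∀ x ∈ ["[advance]".toList], x ∈ pvMarkerList :=
    fun x hx => List.Mem.tail _ (List.Mem.tail _ (List.Mem.tail _ hx))
  have hsub0 : ∀ x ∈ ([] : List (List Char)), x ∈ pvMarkerList := by simp
  have hbf1 := badFree_removeAll hm1 _ hbf0
  have hbf2 := badFree_removeAll hm2 _ hbf1
  have hbf3 := badFree_removeAll hm3 _ hbf2
  have e1 := scan_peel hm1 hsub3 response.toList.length response.toList le_rfl hbf0
  have e2 := scan_peel hm2 hsub2 _ _ le_rfl hbf1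
  have e3 := scan_peel hm3 hsub1 _ _ le_rfl hbf2
  have e4 := scan_peel hm4 hsub0 _ _ le_rfl hbf3
  rw [scanGo_no_markers] at e4
  rw [e4] at e3
  rw [e3] at e2
  rw [e2] at e1
  rw [e1]
  simp only [List.foldl_cons, List.foldl_nil]
  rw [stepA_eq _ hm1 _ _, stepA_eq _ hm2 _ _, stepA_eq _ hm3 _ _, stepA_eq _ hm4 _ _]
  simp [Bool.or_assoc]
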